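-- pv_equiv track=rewrite | github.com/turrisxyz/spyder | spyder/plugins/editor/extensions/docstring.py | find_quote_position
-- ===== SOURCE A (Python) =====
-- def find_quote_position(text):
--     """Return the start and end position of pairs of quotes."""
--     pos = {}
--     is_found_left_quote = False
--
--     for i, c in enumerate(text):
--         if is_found_left_quote is False:
--             if c == "'" or c == '"':
--                 is_found_left_quote = True
--                 quote = c
--                 left_pos = i
--         else:
--             if c == quote and text[i - 1] != '\\':
--                 pos[left_pos] = i
--                 is_found_left_quote = False
--
--     if is_found_left_quote:
--         raise IndexError("No matching close quote at: " + str(left_pos))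
--
--     return pos
-- ===== SOURCE B (Python) =====
-- def find_quote_position(text):
--     """Return the start and end position of pairs of quotes."""
--     # Stage 1: extract only the quote events (index, char, is-escaped).
--     events = [(i, c, i > 0 and text[i - 1] == '\\')
--               for i, c in enumerate(text) if c == "'" or c == '"']
--
--     # Stage 2: recursively pair each opener with its first unescaped close.
--     def pair(evts):
--         if not evts:
--             return []
--         i, q, _ = evts[0]
--         for k in range(1, len(evts)):
--             j, c, esc = evts[k]
--             if c == q and not esc:
--                 return [(i, j)] + pair(evts[k + 1:])
--         raise IndexError("No matching close quote at: " + str(i))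
--
--     return dict(pair(events))
-- ===== Notes on version B (the rewrite author's own statement) =====
-- stated objective: alternative
-- what changed: Replaced A's single character-by-character pass with a found-left-quote flag by two stages: one pass extracts the list of quote events (index, quote char, escaped flag), then a recursive pairing over that event list matches each opener with its first unescaped close; Pre_ excludes texts with an unmatched trailing opening quote, on which both A and B raise the same IndexError.
import Mathlib
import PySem

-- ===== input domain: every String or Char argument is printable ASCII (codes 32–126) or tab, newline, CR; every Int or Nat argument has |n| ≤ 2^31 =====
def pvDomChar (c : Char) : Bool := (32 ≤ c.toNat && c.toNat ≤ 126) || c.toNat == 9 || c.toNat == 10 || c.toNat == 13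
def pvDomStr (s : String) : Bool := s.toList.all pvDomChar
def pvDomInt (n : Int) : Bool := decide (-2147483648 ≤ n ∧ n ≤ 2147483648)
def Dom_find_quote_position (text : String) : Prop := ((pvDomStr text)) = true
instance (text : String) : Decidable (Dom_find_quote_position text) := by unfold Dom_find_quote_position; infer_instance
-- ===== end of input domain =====

-- B replaces A's single character-by-character pass with a boolean state flag by two stages:
-- first extract the list of quote events (index, char, escaped-flag), then recursively pair
-- openers with their first unescaped close over that event list; objective: alternative, same cost.


-- ===== PORT A =====
-- A's for-loop over enumerate(text) as structural recursion over the same state: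
-- pos (dict as assoc list, appended in insertion order), and the flag/quote/left_pos
-- triple as Option (Char × Int).  `text[i-1]` is PySem.List.pyGet? full (i-1).
def aLoop (cs : List Char) (full : List Char) (i : Int)
    (pos : List (Int × Int)) (st : Option (Char × Int)) :
    List (Int × Int) × Option (Char × Int) :=
  match cs with
  | [] => (pos, st)
  | c :: rest =>
    match st with
    | none =>
      if c = '\'' ∨ c = '"' then aLoop rest full (i + 1) pos (some (c, i))
      else aLoop rest full (i + 1) pos none
    | some (q, left) =>
      if c = q ∧ PySem.List.pyGet? full (i - 1) ≠ some '\\' then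
        aLoop rest full (i + 1) (pos ++ [(left, i)]) none
      else aLoop rest full (i + 1) pos (some (q, left))

-- Python A raises IndexError when the final state still holds an open quote;
-- those inputs are excluded by Pre_ below, and the port returns pos as built.
def find_quote_position (text : String) : List (Int × Int) :=
  (aLoop text.toList text.toList 0 [] none).1

-- ===== PORT B =====
-- Stage 1: the quote-event list [(i, c, i > 0 and text[i-1] == '\\') | c a quote].
def bEvents (cs : List Char) (full : List Char) (i : Int) : List (Int × Char × Bool) :=
  match cs with
  | [] => []
  | c :: rest =>
    if c = '\'' ∨ c = '"' then
      (i, c, decide (i > 0) && (PySem.List.pyGet? full (i - 1) == some '\\')) ::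
        bEvents rest full (i + 1)
    else bEvents rest full (i + 1)

-- Stage 2: pair(evts) — the opener is evts[0], its close the first later event with the
-- same char and esc = false; recurse on the events after the close.  Python B raises
-- IndexError when no close exists; those inputs are excluded by Pre_ below.
mutual
def bPair : List (Int × Char × Bool) → List (Int × Int)
  | [] => []
  | (i, q, _) :: rest => bFind i q rest

def bFind (i : Int) (q : Char) : List (Int × Char × Bool) → List (Int × Int)
  | [] => []
  | (j, c, esc) :: rest =>
    if c = q ∧ esc = false then (i, j) :: bPair rest else bFind i q rest
end

def find_quote_position_alt (text : String) : List (Int × Int) :=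
  bPair (bEvents text.toList text.toList 0)

-- ===== PRECONDITION & SPEC =====
-- Pre_ excludes exactly the texts with an unmatched trailing opening quote, on which
-- the Python A raises IndexError (Python B raises the same IndexError there).
-- pvClosed/pvScan is the natural closed form of "every quote is closed" (a two-state
-- predicate over the characters; it carries no indices and builds no output).
mutual
def pvClosed : List Char → Bool
  | [] => true
  | c :: rest => if c = '\'' ∨ c = '"' then pvScan c c rest else pvClosed rest

def pvScan (q : Char) (prev : Char) : List Char → Bool
  | [] => false
  | c :: rest => if c = q ∧ prev ≠ '\\' then pvClosed rest else pvScan q c rest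
end

def Pre_find_quote_position (text : String) : Prop := pvClosed text.toList = true
instance (text : String) : Decidable (Pre_find_quote_position text) := by
  unfold Pre_find_quote_position; infer_instance

def pvWitness_find_quote_position : String := "a'b\"c' d"

def Spec_find_quote_position (text : String) (out : List (Int × Int)) : Prop := out = find_quote_position_alt text
instance (text : String) (out : List (Int × Int)) : Decidable (Spec_find_quote_position text out) := by unfold Spec_find_quote_position; infer_instance

-- ===== CLAIM (what is proved, stated in full; the proofs are below) =====
def Claim_equal_find_quote_position : Prop := ∀ (text : String), Dom_find_quote_position text → Pre_find_quote_position text → Spec_find_quote_position text (find_quote_position text)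

-- ===== LEMMAS AND PROOFS =====

-- A's one-pass state machine equals B's staged pairing of the event list, in both states;
-- the open state only ever occurs at indices i ≥ 1, where B's escaped-flag coincides with
-- A's text[i-1] ≠ '\\' test.  The equality holds unconditionally (no Pre_ needed).
theorem aLoop_eq (cs : List Char) :
    (∀ (full : List Char) (i : Int) (pos : List (Int × Int)), 0 ≤ i →
        (aLoop cs full i pos none).1 = pos ++ bPair (bEvents cs full i)) ∧
    (∀ (full : List Char) (i : Int) (pos : List (Int × Int)) (q : Char) (left : Int),
        1 ≤ i → (q = '\'' ∨ q = '"') →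
        (aLoop cs full i pos (some (q, left))).1 = pos ++ bFind left q (bEvents cs full i)) := by
  induction cs with
  | nil => simp [aLoop, bEvents, bPair, bFind]
  | cons c rest ih =>
    constructor
    · intro full i pos hi
      simp only [aLoop, bEvents]
      by_cases h : c = '\'' ∨ c = '"'
      · simp only [h, if_pos, if_true, bPair]
        exact ih.2 full (i + 1) pos c i (by omega) h
      · simp only [h, if_false, if_neg, not_false_iff]
        exact ih.1 full (i + 1) pos (by omega)
    · intro full i pos q left hi hq
      simp only [aLoop, bEvents]
      by_cases h : c = '\'' ∨ c = '"'
      · simp only [h, if_pos, if_true, bFind]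
        have hesc : (decide (i > 0) && (PySem.List.pyGet? full (i - 1) == some '\\')) = false
            ↔ PySem.List.pyGet? full (i - 1) ≠ some '\\' := by
          simp [decide_eq_true (show i > 0 by omega)]
        by_cases hc : c = q ∧ PySem.List.pyGet? full (i - 1) ≠ some '\\'
        · have : c = q ∧ (decide (i > 0) && (PySem.List.pyGet? full (i - 1) == some '\\')) = false :=
            ⟨hc.1, hesc.mpr hc.2⟩
          simp only [if_pos hc, if_pos this]
          rw [ih.1 full (i + 1) (pos ++ [(left, i)]) (by omega)]
          simp
        · have : ¬ (c = q ∧ (decide (i > 0) && (PySem.List.pyGet? full (i - 1) == some '\\')) = false) := by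
            intro ⟨h1, h2⟩; exact hc ⟨h1, hesc.mp h2⟩
          simp only [if_neg hc, if_neg this]
          exact ih.2 full (i + 1) pos q left (by omega) hq
      · have hcq : ¬ (c = q ∧ PySem.List.pyGet? full (i - 1) ≠ some '\\') := by
          rintro ⟨rfl, -⟩; exact h hq
        simp only [h, if_neg, not_false_iff, if_neg hcq]
        exact ih.2 full (i + 1) pos q left (by omega) hq

-- ===== VERDICT (by name: the statement is the Claim_ definition above) =====
theorem find_quote_position_spec : Claim_equal_find_quote_position := by
  intro text _ _
  unfold Spec_find_quote_position find_quote_position find_quote_position_alt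
  simpa using (aLoop_eq text.toList).1 text.toList 0 [] le_rfl
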